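-- pv_equiv track=rewrite | github.com/FabianHinder/Feature-based-Analyses-of-Concept-Drift | Main.py | filter_setup
-- ===== SOURCE A (Python) =====
-- def filter_setup(name=None,tpe=None,model=None,select=None, filter_off=True):
--     if filter_off:
--         return True
--     pattern = {"name":name, "type":tpe, "model": model, "select": select}
--
--     allowed = [
--         {"name":"all", "type":"usup", "model": None, "select": -1},
--         {"name":"PCA", "type":"usup", "model": None, "select": 15},
--         {"name":"GRP", "type":"usup", "model": None, "select": 15},
--         {"name":"URP", "type":"usup", "model": None, "select": 10},
--         {"name":"SRP", "type":"usup", "model": None, "select": 15},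
--         {"name":"MI", "type":"reg", "model": None, "select": 10},
--         {"name":"RFE", "type":"cls", "model":"ET", "select": 10},
--         {"name":"Boruta", "type":"reg", "model":"ET", "select": "strong"},
--         {"name":"PFI", "type":"reg", "model":"ET", "select": 3},
--         {"name":"FI", "type":"cls", "model":"ET", "select": 5}
--     ]
--
--     for k,v in pattern.items():
--         if v is not None:
--             v = str(v)
--             allowed = [a for a in allowed if str(a[k]) == v]
--     return len(allowed) > 0
-- ===== SOURCE B (Python) =====
-- def filter_setup(name=None, tpe=None, model=None, select=None, filter_off=True):
--     if filter_off:
--         return True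
--     # inverted index: for each field, map a string value to the bitmask of
--     # allowed configs carrying it; a pattern matches iff the AND of the masks
--     # of its provided values is non-zero.
--     columns = [
--         (["all","PCA","GRP","URP","SRP","MI","RFE","Boruta","PFI","FI"], name),
--         (["usup","usup","usup","usup","usup","reg","cls","reg","reg","cls"], tpe),
--         (["None","None","None","None","None","None","ET","ET","ET","ET"], model),
--         (["-1","15","15","10","15","10","10","strong","3","5"], select),
--     ]
--     mask = (1 << 10) - 1
--     for col, v in columns:
--         if v is not None:
--             index = {}
--             for i, s in enumerate(col):
--                 index[s] = index.get(s, 0) | (1 << i)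
--             mask &= index.get(str(v), 0)
--     return mask != 0
-- ===== Notes on version B (the rewrite author's own statement) =====
-- stated objective: alternative
-- what changed: Replaces A's iterative narrowing of the allowed list (one filter pass per pattern key) by an inverted index: per field a dict from string value to the bitmask of matching configs, the result being whether the AND of the masks of the provided values is non-zero.
import Mathlib
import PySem

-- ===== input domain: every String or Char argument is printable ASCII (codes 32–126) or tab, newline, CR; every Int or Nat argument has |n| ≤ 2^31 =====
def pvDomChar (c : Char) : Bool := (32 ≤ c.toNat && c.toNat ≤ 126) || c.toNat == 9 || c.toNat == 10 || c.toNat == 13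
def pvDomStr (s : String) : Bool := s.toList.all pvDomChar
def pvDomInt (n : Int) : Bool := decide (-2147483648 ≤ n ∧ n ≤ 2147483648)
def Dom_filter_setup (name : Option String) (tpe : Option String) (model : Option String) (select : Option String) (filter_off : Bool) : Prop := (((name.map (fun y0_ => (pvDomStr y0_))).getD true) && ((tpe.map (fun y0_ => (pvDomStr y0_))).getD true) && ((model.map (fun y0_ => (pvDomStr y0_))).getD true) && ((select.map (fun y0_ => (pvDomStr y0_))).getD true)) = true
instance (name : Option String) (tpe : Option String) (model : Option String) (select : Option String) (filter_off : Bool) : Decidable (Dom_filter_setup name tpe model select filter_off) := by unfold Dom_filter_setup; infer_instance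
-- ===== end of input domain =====

-- B replaces A's iterative narrowing of the allowed list by an inverted index:
-- per field, a dict from string value to the bitmask of matching configs; the
-- pattern matches iff the AND of the masks of the provided values is non-zero.
-- Objective: alternative (different data structure, same behaviour).

-- ===== PORT A =====
-- heterogeneous dict value (str | int | None) with Python's str() applied to it
inductive PVal
  | vs : String → PVal
  | vi : Int → PVal
  | vnone : PVal
deriving DecidableEq, Repr

def PVal.pyStr : PVal → String
  | .vs t => t
  | .vi n => PySem.Int.toStr n
  | .vnone => "None"

-- the constant `allowed` table of A
def allowedConfigs : List (PySem.Dict String PVal) :=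
  [ PySem.Dict.ofList [("name", PVal.vs "all"),    ("type", PVal.vs "usup"), ("model", PVal.vnone),   ("select", PVal.vi (-1))],
    PySem.Dict.ofList [("name", PVal.vs "PCA"),    ("type", PVal.vs "usup"), ("model", PVal.vnone),   ("select", PVal.vi 15)],
    PySem.Dict.ofList [("name", PVal.vs "GRP"),    ("type", PVal.vs "usup"), ("model", PVal.vnone),   ("select", PVal.vi 15)],
    PySem.Dict.ofList [("name", PVal.vs "URP"),    ("type", PVal.vs "usup"), ("model", PVal.vnone),   ("select", PVal.vi 10)],
    PySem.Dict.ofList [("name", PVal.vs "SRP"),    ("type", PVal.vs "usup"), ("model", PVal.vnone),   ("select", PVal.vi 15)],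
    PySem.Dict.ofList [("name", PVal.vs "MI"),     ("type", PVal.vs "reg"),  ("model", PVal.vnone),   ("select", PVal.vi 10)],
    PySem.Dict.ofList [("name", PVal.vs "RFE"),    ("type", PVal.vs "cls"),  ("model", PVal.vs "ET"), ("select", PVal.vi 10)],
    PySem.Dict.ofList [("name", PVal.vs "Boruta"), ("type", PVal.vs "reg"),  ("model", PVal.vs "ET"), ("select", PVal.vs "strong")],
    PySem.Dict.ofList [("name", PVal.vs "PFI"),    ("type", PVal.vs "reg"),  ("model", PVal.vs "ET"), ("select", PVal.vi 3)],
    PySem.Dict.ofList [("name", PVal.vs "FI"),     ("type", PVal.vs "cls"),  ("model", PVal.vs "ET"), ("select", PVal.vi 5)] ]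

-- str(a[k]); every key used is present in every config, so getD's default is never hit
def pyStrAt (a : PySem.Dict String PVal) (k : String) : String :=
  (PySem.Dict.getD a k PVal.vnone).pyStr

def filter_setup (name : Option String) (tpe : Option String) (model : Option String) (select : Option String) (filter_off : Bool) : Bool :=
  if filter_off then true
  else
    let pattern : List (String × Option String) :=
      [("name", name), ("type", tpe), ("model", model), ("select", select)]
    let allowed := pattern.foldl (fun acc kv =>
      match kv.2 with
      | none => acc
      | some v => acc.filter (fun a => pyStrAt a kv.1 == v)) allowedConfigs
    decide (allowed.length > 0)

-- ===== PORT B =====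
-- `index[s] = index.get(s, 0) | (1 << i)` over `enumerate(col)`
def buildIndex (col : List String) : PySem.Dict String Nat :=
  (PySem.List.enumerate col).foldl
    (fun d p => d.insert p.2 ((d.getD p.2 0) ||| (1 <<< p.1.toNat)))
    PySem.Dict.empty

def filter_setup_alt (name : Option String) (tpe : Option String) (model : Option String) (select : Option String) (filter_off : Bool) : Bool :=
  if filter_off then true
  else
    let columns : List (List String × Option String) :=
      [ (["all","PCA","GRP","URP","SRP","MI","RFE","Boruta","PFI","FI"], name),
        (["usup","usup","usup","usup","usup","reg","cls","reg","reg","cls"], tpe),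
        (["None","None","None","None","None","None","ET","ET","ET","ET"], model),
        (["-1","15","15","10","15","10","10","strong","3","5"], select) ]
    let mask := columns.foldl (fun m p =>
      match p.2 with
      | none => m
      | some v => m &&& (buildIndex p.1).getD v 0) ((1 <<< 10) - 1)
    decide (mask ≠ 0)

-- ===== PRECONDITION & SPEC =====
def Spec_filter_setup (name : Option String) (tpe : Option String) (model : Option String) (select : Option String) (filter_off : Bool) (out : Bool) : Prop := out = filter_setup_alt name tpe model select filter_off
instance (name : Option String) (tpe : Option String) (model : Option String) (select : Option String) (filter_off : Bool) (out : Bool) : Decidable (Spec_filter_setup name tpe model select filter_off out) := by unfold Spec_filter_setup; infer_instance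

-- ===== CLAIM (what is proved, stated in full; the proofs are below) =====
def Claim_equal_filter_setup : Prop := ∀ (name : Option String) (tpe : Option String) (model : Option String) (select : Option String) (filter_off : Bool), Dom_filter_setup name tpe model select filter_off → Spec_filter_setup name tpe model select filter_off (filter_setup name tpe model select filter_off)

-- ===== LEMMAS AND PROOFS =====

-- A's repeated narrowing equals a single filter by the conjunction of all key tests
theorem foldl_filter_eq_filter_all (pats : List (String × Option String))
    (xs : List (PySem.Dict String PVal)) :
    pats.foldl (fun acc kv =>
        match kv.2 with
        | none => acc
        | some v => acc.filter (fun a => pyStrAt a kv.1 == v)) xs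
      = xs.filter (fun a => pats.all (fun kv =>
          match kv.2 with
          | none => true
          | some v => pyStrAt a kv.1 == v)) := by
  induction pats generalizing xs with
  | nil => simp
  | cons kv rest ih =>
    cases h : kv.2 with
    | none =>
      simp only [List.foldl_cons, h, ih, List.all_cons]
      simp
    | some v =>
      simp only [List.foldl_cons, h, ih, List.filter_filter, List.all_cons]
      congr 1
      funext a
      simp [Bool.and_comm]

theorem filter_length_pos_eq_any (p : PySem.Dict String PVal → Bool)
    (xs : List (PySem.Dict String PVal)) :
    decide ((xs.filter p).length > 0) = xs.any p := by
  induction xs with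
  | nil => simp
  | cons x xs ih =>
    by_cases h : p x <;> simp [h, ← ih]

-- the mask buildIndex associates with value v: one bit per position of v in col
def maskOf (col : List String) (s : Nat) (v : String) : Nat :=
  match col with
  | [] => 0
  | c :: cs => (if c = v then 1 <<< s else 0) ||| maskOf cs (s + 1) v

theorem getD_buildAux (col : List String) (s : Nat) (d : PySem.Dict String Nat) (v : String) :
    ((PySem.List.enumerate col (s : Int)).foldl
        (fun d p => d.insert p.2 ((d.getD p.2 0) ||| (1 <<< p.1.toNat))) d).getD v 0
      = d.getD v 0 ||| maskOf col s v := by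
  induction col generalizing s d with
  | nil => simp [PySem.List.enumerate_nil, maskOf]
  | cons c cs ih =>
    rw [PySem.List.enumerate_cons, List.foldl_cons]
    have hc : ((s : Int) + 1) = ((s + 1 : Nat) : Int) := by push_cast; ring
    rw [hc, ih]
    rw [PySem.Dict.getD_insert]
    have hm : maskOf (c :: cs) s v = (if c = v then 1 <<< s else 0) ||| maskOf cs (s + 1) v := rfl
    rw [hm]
    by_cases h : v = c
    · subst h; simp [Nat.lor_assoc]
    · simp [h, Ne.symm h]

theorem testBit_maskOf (col : List String) (s : Nat) (v : String) (i : Nat) :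
    (maskOf col s v).testBit i
      = (decide (s ≤ i ∧ i < s + col.length) && (col.getD (i - s) "" == v)) := by
  induction col generalizing s with
  | nil => simp [maskOf]
  | cons c cs ih =>
    have hm : maskOf (c :: cs) s v = (if c = v then 1 <<< s else 0) ||| maskOf cs (s + 1) v := rfl
    rw [hm, Nat.testBit_or, ih]
    by_cases hi : i = s
    · subst hi
      by_cases h : c = v <;> simp [h, Nat.shiftLeft_eq]
    · have h1 : (if c = v then 1 <<< s else 0).testBit i = false := by
        by_cases h : c = v <;>
          simp [h, Nat.shiftLeft_eq, Ne.symm hi]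
      rw [h1]
      by_cases hlt : i < s
      · have : ¬ (s + 1 ≤ i) := by omega
        simp [hlt, this]
      · have hs : s < i := by omega
        have hsub : i - s = (i - (s+1)) + 1 := by omega
        simp only [Bool.false_or]
        rw [hsub]
        simp only [List.getD_cons_succ]
        congr 1
        simp only [List.length_cons, decide_eq_decide]
        omega

theorem getD_buildIndex (col : List String) (v : String) :
    (buildIndex col).getD v 0 = maskOf col 0 v := by
  unfold buildIndex
  have := getD_buildAux col 0 PySem.Dict.empty v
  simp only [Nat.cast_zero] at this
  rw [this]
  simp [PySem.Dict.getD_empty]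

set_option maxRecDepth 100000 in
theorem ne0_bits_aux : ∀ m < 1024, decide (m ≠ 0)
    = (m.testBit 0 || m.testBit 1 || m.testBit 2 || m.testBit 3 || m.testBit 4 ||
       m.testBit 5 || m.testBit 6 || m.testBit 7 || m.testBit 8 || m.testBit 9) := by
  decide

theorem ne0_iff_bits (m : Nat) (h : m < 1024) : decide (m ≠ 0)
    = (m.testBit 0 || m.testBit 1 || m.testBit 2 || m.testBit 3 || m.testBit 4 ||
       m.testBit 5 || m.testBit 6 || m.testBit 7 || m.testBit 8 || m.testBit 9) :=
  ne0_bits_aux m h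

theorem tb1023 (i : Nat) : Nat.testBit 1023 i = decide (i < 10) := by
  have h := Nat.testBit_two_pow_sub_one (n := 10) (i := i)
  norm_num at h
  exact h

theorem toStr_neg1 : PySem.Int.toStr (-1) = "-1" := by decide
theorem toStr_15 : PySem.Int.toStr 15 = "15" := by decide
theorem toStr_10 : PySem.Int.toStr 10 = "10" := by decide
theorem toStr_3 : PySem.Int.toStr 3 = "3" := by decide
theorem toStr_5 : PySem.Int.toStr 5 = "5" := by decide

-- ===== VERDICT (by name: the statement is the Claim_ definition above) =====
theorem filter_setup_spec : Claim_equal_filter_setup := by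
  intro name tpe model select filter_off _
  unfold Spec_filter_setup filter_setup filter_setup_alt
  cases filter_off with
  | true => simp
  | false =>
    simp only [Bool.false_eq_true, if_false]
    rw [foldl_filter_eq_filter_all, filter_length_pos_eq_any]
    cases name <;> cases tpe <;> cases model <;> cases select <;>
      simp only [List.foldl_cons, List.foldl_nil] <;>
      first
      | decide
      | (refine Eq.trans ?_ ((ne0_iff_bits _ (by
            refine Nat.lt_of_le_of_lt ?_ (by decide : (1023:Nat) < 1024)
            (repeat refine le_trans Nat.and_le_left ?_)
            decide)).symm)
         simp only [Nat.testBit_and, getD_buildIndex, testBit_maskOf]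
         simp [allowedConfigs, pyStrAt, PVal.pyStr, PySem.Dict.ofList, PySem.Dict.getD,
           PySem.Dict.get?, PySem.Dict.update, PySem.Dict.insert, PySem.Dict.empty,
           toStr_neg1, toStr_15, toStr_10, toStr_3, toStr_5, tb1023, List.getD,
           beq_iff_eq, Bool.or_assoc, Bool.and_assoc])
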